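-- pv_equiv track=rewrite | github.com/jordiSabroson/IA | Models de llenguatge/tokenizer.py | substituir_sequencies
-- ===== SOURCE A (Python) =====
-- def substituir_sequencies(tokens, frequents, diccionari):
--     i = 0
--     resultat = []
--     while i < len(tokens):
--         substituit = False
--         for longitut in range(max(len(seq) for seq in frequents), 0, -1):
--             if i + longitut <= len(tokens):
--                 subsequencia = tuple(tokens[i:i+longitut])
--                 if subsequencia in frequents:
--                     resultat.append(diccionari[subsequencia])
--                     i += longitut
--                     substituit = True
--                     break
--         if not substituit:
--             resultat.append(tokens[i])
--             i += 1
--     return resultat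
-- ===== SOURCE B (Python) =====
-- def substituir_sequencies(tokens, frequents, diccionari):
--     # One pass per position over `frequents`, keeping the longest sequence that
--     # prefixes tokens[i:], instead of A's descending scan over all lengths with
--     # a membership test per length.
--     n = len(tokens)
--     resultat = []
--     i = 0
--     while i < n:
--         best = None
--         for seq in frequents:
--             if seq and (best is None or len(best) < len(seq)) and tuple(tokens[i:i + len(seq)]) == tuple(seq):
--                 best = seq
--         if best is None:
--             resultat.append(tokens[i])
--             i += 1
--         else:
--             resultat.append(diccionari[best])
--             i += len(best)
--     return resultat
-- ===== Notes on version B (the rewrite author's own statement) =====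
-- stated objective: alternative
-- what changed: Replaces A's per-position descending scan over all candidate lengths with set-membership tests on slices by a single pass over the frequent sequences per position, keeping the longest one that is a prefix of the remaining tokens (a prefix of a given length is unique, so the greedy longest-match result is identical).
-- outside the precondition, e.g. on substituir_sequencies(['a', 'b'], {('a', 'b'), ('b',)}, {('a', 'b'): 'X'}): A returns ['X'], B returns ['X']
import Mathlib
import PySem

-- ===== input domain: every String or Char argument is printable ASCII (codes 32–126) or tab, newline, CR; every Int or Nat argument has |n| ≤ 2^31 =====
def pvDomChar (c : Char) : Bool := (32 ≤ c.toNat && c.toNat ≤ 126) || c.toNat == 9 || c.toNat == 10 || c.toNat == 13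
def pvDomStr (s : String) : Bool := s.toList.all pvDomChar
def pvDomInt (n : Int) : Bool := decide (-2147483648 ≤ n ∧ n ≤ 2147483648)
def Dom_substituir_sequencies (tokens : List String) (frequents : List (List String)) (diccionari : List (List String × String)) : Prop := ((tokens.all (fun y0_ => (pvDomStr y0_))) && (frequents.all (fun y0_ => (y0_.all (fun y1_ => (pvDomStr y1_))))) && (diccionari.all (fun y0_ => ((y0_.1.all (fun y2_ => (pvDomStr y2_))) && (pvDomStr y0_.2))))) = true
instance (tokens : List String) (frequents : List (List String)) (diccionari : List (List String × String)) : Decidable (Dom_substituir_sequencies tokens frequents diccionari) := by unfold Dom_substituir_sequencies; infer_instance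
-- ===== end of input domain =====

-- B replaces A's descending scan over candidate lengths (with a set-membership test on each
-- slice) by one pass over `frequents` per position keeping the longest prefix match: a genuinely
-- different inner traversal of the same greedy longest-match substitution (objective: alternative).

-- ===== PORT A =====
-- diccionari[k]: first-match dict lookup; `none` would be Python's KeyError, excluded by Pre_
-- (helper shared by both ports: both Pythons write the identical expression `diccionari[...]`)
def pvDictGet (diccionari : List (List String × String)) (k : List String) : String :=
  ((PySem.Dict.mk diccionari).get? k).getD ""

-- tokens[i:i+l]
def pvSliceA (tokens : List String) (i l : Nat) : List String :=
  PySem.List.slice tokens (some (i : Int)) (some ((i : Int) + (l : Int)))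

-- `for longitut in range(maxlen, 0, -1): … break`: first length l (descending) with
-- i + l <= len(tokens) and tokens[i:i+l] in frequents
def pvAScan (tokens : List String) (frequents : List (List String)) (i : Nat) : Nat → Option Nat
  | 0 => none
  | l + 1 =>
    if i + (l + 1) ≤ tokens.length ∧ pvSliceA tokens i (l + 1) ∈ frequents then some (l + 1)
    else pvAScan tokens frequents i l

-- needed by pvALoop's termination proof
theorem pvAScan_pos (tokens : List String) (frequents : List (List String)) (i : Nat) :
    ∀ L l, pvAScan tokens frequents i L = some l → 1 ≤ l := by
  intro L
  induction L with
  | zero => intro l h; simp [pvAScan] at h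
  | succ m ih =>
    intro l h
    by_cases hc : i + (m + 1) ≤ tokens.length ∧ pvSliceA tokens i (m + 1) ∈ frequents
    · simp [pvAScan, hc] at h; omega
    · simp [pvAScan, hc] at h; exact ih l h

-- max(len(seq) for seq in frequents); Python raises ValueError on empty frequents (outside Pre_)
def pvMaxLen (frequents : List (List String)) : Nat :=
  (PySem.List.max? (frequents.map List.length) (fun y => y)).getD 0

def pvALoop (tokens : List String) (frequents : List (List String))
    (diccionari : List (List String × String)) (i : Nat) (resultat : List String) : List String :=
  if hlt : i < tokens.length then
    match h : pvAScan tokens frequents i (pvMaxLen frequents) with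
    | some l =>
      pvALoop tokens frequents diccionari (i + l)
        (resultat ++ [pvDictGet diccionari (pvSliceA tokens i l)])
    | none =>
      pvALoop tokens frequents diccionari (i + 1)
        (resultat ++ [(PySem.List.pyGet? tokens (i : Int)).getD ""])
  else resultat
termination_by tokens.length - i
decreasing_by
  · have := pvAScan_pos tokens frequents i _ _ h; omega
  · omega

def substituir_sequencies (tokens : List String) (frequents : List (List String)) (diccionari : List (List String × String)) : List String :=
  pvALoop tokens frequents diccionari 0 []

-- ===== PORT B =====
-- `seq and (best is None or len(best) < len(seq)) and tuple(tokens[i:i+len(seq)]) == tuple(seq)`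
def pvBCond (tokens : List String) (i : Nat) (best : Option (List String)) (seq : List String) : Bool :=
  !seq.isEmpty &&
    (match best with | none => true | some b => decide (b.length < seq.length)) &&
    (PySem.List.slice tokens (some (i : Int)) (some ((i : Int) + (seq.length : Int))) == seq)

-- the inner `for seq in frequents` pass keeping the longest prefix match
def pvBBest (tokens : List String) (frequents : List (List String)) (i : Nat) : Option (List String) :=
  frequents.foldl (fun best seq => if pvBCond tokens i best seq then some seq else best) none

-- needed by pvBLoop's termination proof
theorem pvBBest_ne_nil (tokens : List String) (i : Nat) :
    ∀ (fs : List (List String)) (b : Option (List String)),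
      (∀ s, b = some s → s ≠ []) →
      ∀ s, fs.foldl (fun best seq => if pvBCond tokens i best seq then some seq else best) b = some s → s ≠ [] := by
  intro fs
  induction fs with
  | nil => intro b hb s h; exact hb s h
  | cons seq rest ih =>
    intro b hb s h
    refine ih _ ?_ s h
    intro t ht
    by_cases hc : pvBCond tokens i b seq
    · simp [hc] at ht
      subst ht
      intro hnil
      simp [pvBCond, hnil] at hc
    · simp [hc] at ht; exact hb t ht

def pvBLoop (tokens : List String) (frequents : List (List String))
    (diccionari : List (List String × String)) (i : Nat) (resultat : List String) : List String :=
  if hlt : i < tokens.length then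
    match h : pvBBest tokens frequents i with
    | none =>
      pvBLoop tokens frequents diccionari (i + 1)
        (resultat ++ [(PySem.List.pyGet? tokens (i : Int)).getD ""])
    | some b =>
      pvBLoop tokens frequents diccionari (i + b.length)
        (resultat ++ [pvDictGet diccionari b])
  else resultat
termination_by tokens.length - i
decreasing_by
  · omega
  · have hb : b ≠ [] := pvBBest_ne_nil tokens i frequents none (by simp) b h
    have : 0 < b.length := List.length_pos_iff.mpr hb
    omega

def substituir_sequencies_alt (tokens : List String) (frequents : List (List String)) (diccionari : List (List String × String)) : List String :=
  pvBLoop tokens frequents diccionari 0 []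

-- ===== PRECONDITION & SPEC =====
-- Pre_ excludes (a) nonempty tokens with empty frequents, where Python A raises ValueError
-- (max over an empty generator), and (b) inputs where some nonempty frequent sequence occurring
-- as a contiguous infix of tokens has no entry in diccionari: the greedy run may match such a
-- sequence and then A raises KeyError (a conservative closed-form bound: A still returns on
-- such inputs whose run never matches the unkeyed sequence; see the cite).
def Pre_substituir_sequencies (tokens : List String) (frequents : List (List String)) (diccionari : List (List String × String)) : Prop :=
  (tokens = [] ∨ frequents ≠ []) ∧
  ∀ s ∈ frequents, s ≠ [] → s <:+: tokens → ((PySem.Dict.mk diccionari).get? s).isSome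
instance (tokens : List String) (frequents : List (List String)) (diccionari : List (List String × String)) : Decidable (Pre_substituir_sequencies tokens frequents diccionari) := by unfold Pre_substituir_sequencies; infer_instance

def pvWitness_substituir_sequencies : List String × List (List String) × (List (List String × String)) :=
  (["a", "b", "c"], [["a", "b"]], [(["a", "b"], "X")])

def Spec_substituir_sequencies (tokens : List String) (frequents : List (List String)) (diccionari : List (List String × String)) (out : List String) : Prop := out = substituir_sequencies_alt tokens frequents diccionari
instance (tokens : List String) (frequents : List (List String)) (diccionari : List (List String × String)) (out : List String) : Decidable (Spec_substituir_sequencies tokens frequents diccionari out) := by unfold Spec_substituir_sequencies; infer_instance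

-- ===== CLAIM (what is proved, stated in full; the proofs are below) =====
def Claim_equal_substituir_sequencies : Prop := ∀ (tokens : List String) (frequents : List (List String)) (diccionari : List (List String × String)), Dom_substituir_sequencies tokens frequents diccionari → Pre_substituir_sequencies tokens frequents diccionari → Spec_substituir_sequencies tokens frequents diccionari (substituir_sequencies tokens frequents diccionari)


-- ===== LEMMAS AND PROOFS =====

-- `s` is a nonempty prefix of the rest of the tokens (what B's inner pass looks for)
def pvQ (tokens : List String) (i : Nat) (s : List String) : Prop :=
  s ≠ [] ∧ pvSliceA tokens i s.length = s

-- the condition A's inner scan tests at length l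
def pvP (tokens : List String) (frequents : List (List String)) (i l : Nat) : Prop :=
  i + l ≤ tokens.length ∧ pvSliceA tokens i l ∈ frequents

theorem pvSliceA_eq (tokens : List String) (i l : Nat) :
    pvSliceA tokens i l = (tokens.drop i).take l :=
  PySem.List.slice_natCast_add tokens i l

theorem pvQ_len {tokens : List String} {i : Nat} {s : List String} (h : pvQ tokens i s) :
    i + s.length ≤ tokens.length ∧ 1 ≤ s.length := by
  obtain ⟨hne, hsl⟩ := h
  have h1 : 1 ≤ s.length := List.length_pos_iff.mpr hne
  have := congrArg List.length hsl
  rw [pvSliceA_eq] at this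
  simp [List.length_take, List.length_drop] at this
  omega

theorem pvP_iff {tokens : List String} {frequents : List (List String)} {i l : Nat}
    (hl : 1 ≤ l) :
    pvP tokens frequents i l ↔ ∃ s ∈ frequents, pvQ tokens i s ∧ s.length = l := by
  constructor
  · rintro ⟨hle, hmem⟩
    have hlen : (pvSliceA tokens i l).length = l := by
      rw [pvSliceA_eq]
      simp [List.length_take, List.length_drop]
      omega
    refine ⟨pvSliceA tokens i l, hmem, ⟨?_, ?_⟩, hlen⟩
    · intro hnil; rw [hnil] at hlen; simp at hlen; omega
    · rw [hlen]
  · rintro ⟨s, hmem, hQ, hlen⟩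
    have hq := pvQ_len hQ
    subst hlen
    refine ⟨hq.1, ?_⟩
    rw [hQ.2]; exact hmem

theorem pvAScan_eq_none {tokens : List String} {frequents : List (List String)} {i : Nat}
    (L : Nat) (h : ∀ l, 1 ≤ l → l ≤ L → ¬ pvP tokens frequents i l) :
    pvAScan tokens frequents i L = none := by
  induction L with
  | zero => rfl
  | succ m ih =>
    have hc : ¬ (i + (m + 1) ≤ tokens.length ∧ pvSliceA tokens i (m + 1) ∈ frequents) :=
      h (m + 1) (by omega) (by omega)
    simp only [pvAScan, if_neg hc]
    exact ih fun l h1 h2 => h l h1 (by omega)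

theorem pvAScan_eq_some {tokens : List String} {frequents : List (List String)} {i l : Nat}
    (L : Nat) (hP : pvP tokens frequents i l) (h1 : 1 ≤ l) (hle : l ≤ L)
    (hmax : ∀ l', l < l' → ¬ pvP tokens frequents i l') :
    pvAScan tokens frequents i L = some l := by
  induction L with
  | zero => omega
  | succ m ih =>
    by_cases he : l = m + 1
    · subst he
      simp only [pvAScan, if_pos (show i + (m + 1) ≤ tokens.length ∧ _ from hP)]
    · have hc : ¬ (i + (m + 1) ≤ tokens.length ∧ pvSliceA tokens i (m + 1) ∈ frequents) :=
        hmax (m + 1) (by omega)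
      simp only [pvAScan, if_neg hc]
      exact ih (by omega)

theorem pvBCond_iff {tokens : List String} {i : Nat} (b : Option (List String))
    (seq : List String) :
    pvBCond tokens i b seq = true ↔
      pvQ tokens i seq ∧ ∀ x, b = some x → x.length < seq.length := by
  cases b <;>
    simp [pvBCond, pvQ, pvSliceA, and_comm, and_assoc]

theorem pvBFold (tokens : List String) (i : Nat) :
    ∀ (fs : List (List String)) (b : Option (List String)),
      (∀ s, b = some s → pvQ tokens i s) →
      ((fs.foldl (fun best seq => if pvBCond tokens i best seq then some seq else best) b = none →
          b = none ∧ ∀ t ∈ fs, ¬ pvQ tokens i t) ∧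
        (∀ s,
          fs.foldl (fun best seq => if pvBCond tokens i best seq then some seq else best) b = some s →
            pvQ tokens i s ∧ (s ∈ fs ∨ b = some s) ∧
              (∀ t ∈ fs, pvQ tokens i t → t.length ≤ s.length) ∧
              (∀ s0, b = some s0 → s0.length ≤ s.length))) := by
  intro fs
  induction fs with
  | nil =>
    intro b hb
    simp only [List.foldl_nil]
    refine ⟨fun h => ⟨h, by simp⟩, fun s h => ⟨hb s h, Or.inr h, by simp, ?_⟩⟩
    intro s0 h0; rw [h] at h0; injection h0 with h0; rw [h0]
  | cons seq rest ih =>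
    intro b hb
    by_cases hc : pvBCond tokens i b seq = true
    · have hQseq : pvQ tokens i seq := ((pvBCond_iff b seq).mp hc).1
      have hlt : ∀ x, b = some x → x.length < seq.length := ((pvBCond_iff b seq).mp hc).2
      have hb' : ∀ s, some seq = some s → pvQ tokens i s := by
        intro s h; injection h with h; rw [← h]; exact hQseq
      obtain ⟨ihn, ihs⟩ := ih (some seq) hb'
      constructor
      · intro h
        simp only [List.foldl_cons, if_pos hc] at h
        exact absurd (ihn h).1 (by simp)
      · intro s h
        simp only [List.foldl_cons, if_pos hc] at h
        obtain ⟨hQ, hmem, hmaxr, hacc⟩ := ihs s h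
        have hseqlen : seq.length ≤ s.length := hacc seq rfl
        refine ⟨hQ, ?_, ?_, ?_⟩
        · rcases hmem with hm | hm
          · exact Or.inl (List.mem_cons_of_mem _ hm)
          · injection hm with hm; rw [← hm]; exact Or.inl List.mem_cons_self
        · intro t ht hQt
          rcases List.mem_cons.mp ht with h' | h'
          · rw [h']; exact hseqlen
          · exact hmaxr t h' hQt
        · intro s0 h0
          exact le_trans (le_of_lt (hlt s0 h0)) hseqlen
    · obtain ⟨ihn, ihs⟩ := ih b hb
      constructor
      · intro h
        simp only [List.foldl_cons, if_neg hc] at h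
        obtain ⟨hbn, hrest⟩ := ihn h
        refine ⟨hbn, ?_⟩
        intro t ht
        rcases List.mem_cons.mp ht with h' | h'
        · rw [h']
          intro hQseq
          apply hc
          rw [pvBCond_iff]
          exact ⟨hQseq, by intro x hx; rw [hbn] at hx; cases hx⟩
        · exact hrest t h'
      · intro s h
        simp only [List.foldl_cons, if_neg hc] at h
        obtain ⟨hQ, hmem, hmaxr, hacc⟩ := ihs s h
        refine ⟨hQ, ?_, ?_, hacc⟩
        · rcases hmem with hm | hm
          · exact Or.inl (List.mem_cons_of_mem _ hm)
          · exact Or.inr hm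
        · intro t ht hQt
          rcases List.mem_cons.mp ht with h' | h'
          · subst h'
            by_cases hxb : ∀ x, b = some x → x.length < t.length
            · exact absurd ((pvBCond_iff b t).mpr ⟨hQt, hxb⟩) hc
            · push Not at hxb
              obtain ⟨x, hx, hxl⟩ := hxb
              exact le_trans hxl (hacc x hx)
          · exact hmaxr t h' hQt

theorem pvLen_le_maxLen {frequents : List (List String)} {s : List String}
    (h : s ∈ frequents) : s.length ≤ pvMaxLen frequents := by
  unfold pvMaxLen
  cases hm : PySem.List.max? (frequents.map List.length) (fun y => y) with
  | none =>
    have h0 : frequents.map List.length = [] := (PySem.List.max?_eq_none_iff _ _).mp hm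
    simp at h0
    rw [h0] at h; cases h
  | some m =>
    simpa using PySem.List.max?_isMax hm s.length (List.mem_map_of_mem h)

theorem pvScanBest (tokens : List String) (frequents : List (List String)) (i : Nat) :
    (pvBBest tokens frequents i = none →
        pvAScan tokens frequents i (pvMaxLen frequents) = none) ∧
      (∀ s, pvBBest tokens frequents i = some s →
        pvAScan tokens frequents i (pvMaxLen frequents) = some s.length ∧
          pvSliceA tokens i s.length = s) := by
  obtain ⟨hn, hs⟩ := pvBFold tokens i frequents none (by intro s h; cases h)
  constructor
  · intro h
    obtain ⟨-, hall⟩ := hn h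
    apply pvAScan_eq_none
    intro l h1 h2 hP
    obtain ⟨s, hmem, hQ, -⟩ := (pvP_iff h1).mp hP
    exact hall s hmem hQ
  · intro s h
    obtain ⟨hQ, hmem, hmax, -⟩ := hs s h
    rcases hmem with hmem | hmem
    · have h1 : 1 ≤ s.length := (pvQ_len hQ).2
      have hP : pvP tokens frequents i s.length :=
        (pvP_iff h1).mpr ⟨s, hmem, hQ, rfl⟩
      refine ⟨pvAScan_eq_some _ hP h1 (pvLen_le_maxLen hmem) ?_, hQ.2⟩
      intro l' hl' hP'
      obtain ⟨t, htmem, htQ, htlen⟩ := (pvP_iff (by omega)).mp hP'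
      have := hmax t htmem htQ
      omega
    · cases hmem

theorem pvLoops_eq (tokens : List String) (frequents : List (List String))
    (diccionari : List (List String × String)) :
    ∀ (k i : Nat) (res : List String), tokens.length - i ≤ k →
      pvALoop tokens frequents diccionari i res = pvBLoop tokens frequents diccionari i res := by
  intro k
  induction k with
  | zero =>
    intro i res hk
    rw [pvALoop, pvBLoop]
    have : ¬ i < tokens.length := by omega
    simp [this]
  | succ m ih =>
    intro i res hk
    by_cases hi : i < tokens.length
    · obtain ⟨hn, hs⟩ := pvScanBest tokens frequents i
      rw [pvALoop, pvBLoop]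
      simp only [dif_pos hi]
      split
      · next l hA =>
        split
        · next hB =>
          rw [hn hB] at hA; cases hA
        · next s hB =>
          obtain ⟨hscan, hslice⟩ := hs s hB
          rw [hscan] at hA
          injection hA with hA
          subst hA
          rw [hslice]
          have h1 : 1 ≤ s.length := by
            have hne : s ≠ [] := pvBBest_ne_nil tokens i frequents none (by simp) s hB
            exact List.length_pos_iff.mpr hne
          exact ih (i + s.length) _ (by omega)
      · next hA =>
        split
        · next hB =>
          exact ih (i + 1) _ (by omega)
        · next s hB =>
          rw [(hs s hB).1] at hA; cases hA
    · rw [pvALoop, pvBLoop]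
      simp [hi]

theorem loops_eq (tokens : List String) (frequents : List (List String)) (diccionari : List (List String × String)) :
    ∀ (i : Nat) (res : List String),
      pvALoop tokens frequents diccionari i res = pvBLoop tokens frequents diccionari i res :=
  fun i res => pvLoops_eq tokens frequents diccionari (tokens.length - i) i res (le_refl _)

-- ===== VERDICT (by name: the statement is the Claim_ definition above) =====
theorem substituir_sequencies_spec : Claim_equal_substituir_sequencies := by
  intro tokens frequents diccionari _ _
  unfold Spec_substituir_sequencies substituir_sequencies substituir_sequencies_alt
  exact loops_eq tokens frequents diccionari 0 []
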